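-- pv_equiv track=rewrite | github.com/imnotneon-dev/CSINTSY-mcos | dump/trainer2.py | check_if_filipino
-- ===== SOURCE A (Python) =====
-- from typing import List, Tuple, Optional
--
-- FIL_DOUBLE_VOWELS_CLUES = {'aa', 'ii', 'uu'}
--
-- def check_if_filipino(word: str) -> Optional[str]:
--     """Detect Filipino words via reduplication or double vowels."""
--     if not word:
--         return None
--     word_lower = word.lower()
--
--     # Hyphenated reduplication: bili-bili
--     if '-' in word_lower:
--         parts = word_lower.split('-')
--         if len(parts) == 2 and parts[0] == parts[1] and len(parts[0]) >= 2:
--             return 'FIL'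
--
--     # Double vowels
--     if any(dv in word_lower for dv in FIL_DOUBLE_VOWELS_CLUES):
--         return 'FIL'
--
--     return None
-- ===== SOURCE B (Python) =====
-- def check_if_filipino(word):
--     """Detect Filipino words via reduplication or double vowels."""
--     if not word:
--         return None
--     wl = word.lower()
--     # reduplication: prefix before the first hyphen equals the rest
--     i = wl.find('-')
--     if i >= 2 and wl[:i] == wl[i + 1:]:
--         return 'FIL'
--     # double vowels: one adjacent-character scan instead of substring searches
--     for j in range(len(wl) - 1):
--         if wl[j] == wl[j + 1] and wl[j] in 'aiu':
--             return 'FIL'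
--     return None
-- ===== Notes on version B (the rewrite author's own statement) =====
-- stated objective: alternative
-- what changed: The double-vowel detection becomes a single adjacent-character scan over the lowercased word instead of substring searches for each fixed clue, and the reduplication test compares the prefix before the first hyphen with the rest of the word instead of building the full hyphen-split list and inspecting it.
import Mathlib
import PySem

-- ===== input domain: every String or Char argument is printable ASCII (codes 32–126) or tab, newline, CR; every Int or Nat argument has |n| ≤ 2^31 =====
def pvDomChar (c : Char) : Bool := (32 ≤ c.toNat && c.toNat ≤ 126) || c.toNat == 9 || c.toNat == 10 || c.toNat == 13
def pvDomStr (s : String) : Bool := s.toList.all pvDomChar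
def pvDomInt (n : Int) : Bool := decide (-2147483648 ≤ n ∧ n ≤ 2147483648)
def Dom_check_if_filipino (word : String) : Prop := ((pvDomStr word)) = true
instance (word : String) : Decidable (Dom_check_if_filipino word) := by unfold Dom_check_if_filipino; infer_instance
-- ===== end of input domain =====

-- B replaces A's split('-') reduplication test by a first-hyphen prefix/suffix comparison and
-- A's fixed-substring double-vowel search by one adjacent-character scan (objective: alternative).

-- ===== PORT A =====
-- any(dv in word_lower for dv in FIL_DOUBLE_VOWELS_CLUES)
def pvDoubleVowel (wl : List Char) : Option String :=
  if PySem.Chars.isIn ['a', 'a'] wl || PySem.Chars.isIn ['i', 'i'] wl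
      || PySem.Chars.isIn ['u', 'u'] wl then some "FIL" else none

def check_if_filipino (word : String) : Option String :=
  if word.toList.isEmpty then none
  else
    let wl := PySem.Chars.lower word.toList
    if PySem.Chars.isIn ['-'] wl then
      let parts := PySem.Chars.splitOn wl ['-']
      if parts.length == 2 && parts.getD 0 [] == parts.getD 1 []
          && decide (2 ≤ (parts.getD 0 []).length) then some "FIL"
      else pvDoubleVowel wl
    else pvDoubleVowel wl

-- ===== PORT B =====
-- for j in range(len(wl)-1): if wl[j] == wl[j+1] and wl[j] in 'aiu': return 'FIL'
def pvScanAdj : List Char → Option String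
  | a :: b :: rest =>
      if a == b && (a == 'a' || a == 'i' || a == 'u') then some "FIL"
      else pvScanAdj (b :: rest)
  | _ => none

def check_if_filipino_alt (word : String) : Option String :=
  if word.toList.isEmpty then none
  else
    let wl := PySem.Chars.lower word.toList
    let i := PySem.Chars.find wl ['-']
    if decide (2 ≤ i)
        && (PySem.Chars.slice wl none (some i) == PySem.Chars.slice wl (some (i + 1)) none) then
      some "FIL"
    else pvScanAdj wl

-- ===== PRECONDITION & SPEC =====
def Spec_check_if_filipino (word : String) (out : Option String) : Prop := out = check_if_filipino_alt word
instance (word : String) (out : Option String) : Decidable (Spec_check_if_filipino word out) := by unfold Spec_check_if_filipino; infer_instance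

-- ===== CLAIM (what is proved, stated in full; the proofs are below) =====
def Claim_equal_check_if_filipino : Prop := ∀ (word : String), Dom_check_if_filipino word → Spec_check_if_filipino word (check_if_filipino word)

-- ===== LEMMAS AND PROOFS =====

-- the adjacent scan returns 'FIL' exactly when one of 'aa'/'ii'/'uu' occurs as a substring
theorem pvScanAdj_some_iff (cs : List Char) :
    pvScanAdj cs = some "FIL" ↔
      (['a', 'a'] <:+: cs ∨ ['i', 'i'] <:+: cs ∨ ['u', 'u'] <:+: cs) := by
  induction cs with
  | nil => simp [pvScanAdj]
  | cons a rest ih =>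
    match rest, ih with
    | [], _ =>
      constructor
      · intro h; simp [pvScanAdj] at h
      · intro h
        exfalso
        rcases h with h | h | h <;>
          · have := h.length_le; simp at this
    | b :: t, ih =>
      have hpre : ∀ x : Char, ([x, x] <+: a :: b :: t) ↔ (a = x ∧ b = x) := by
        intro x
        simp only [List.cons_prefix_cons, List.nil_prefix, and_true]
        constructor
        · exact fun ⟨h1, h2⟩ => ⟨h1.symm, h2.symm⟩
        · exact fun ⟨h1, h2⟩ => ⟨h1.symm, h2.symm⟩
      by_cases hif : (a == b && (a == 'a' || a == 'i' || a == 'u')) = true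
      · have hscan : pvScanAdj (a :: b :: t) = some "FIL" := by simp [pvScanAdj, hif]
        simp only [Bool.and_eq_true, beq_iff_eq, Bool.or_eq_true] at hif
        obtain ⟨hab, hv⟩ := hif
        refine iff_of_true hscan ?_
        rcases hv with (hv | hv) | hv
        · exact Or.inl (List.IsPrefix.isInfix ((hpre _).2 ⟨hv, hab ▸ hv⟩))
        · exact Or.inr (Or.inl (List.IsPrefix.isInfix ((hpre _).2 ⟨hv, hab ▸ hv⟩)))
        · exact Or.inr (Or.inr (List.IsPrefix.isInfix ((hpre _).2 ⟨hv, hab ▸ hv⟩)))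
      · have hscan : pvScanAdj (a :: b :: t) = pvScanAdj (b :: t) := by
          simp [pvScanAdj, hif]
        have hfalse : ∀ x : Char, (x = 'a' ∨ x = 'i' ∨ x = 'u') → ¬ ([x, x] <+: a :: b :: t) := by
          intro x hx hp
          obtain ⟨h1, h2⟩ := (hpre x).1 hp
          apply hif
          subst h1; subst h2
          rcases hx with h | h | h <;> subst h <;> decide
        have h1 := hfalse 'a' (Or.inl rfl)
        have h2 := hfalse 'i' (Or.inr (Or.inl rfl))
        have h3 := hfalse 'u' (Or.inr (Or.inr rfl))
        rw [hscan, ih]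
        simp [List.infix_cons_iff, h1, h2, h3]

theorem pvScanAdj_none_or (cs : List Char) :
    pvScanAdj cs = some "FIL" ∨ pvScanAdj cs = none := by
  induction cs with
  | nil => right; rfl
  | cons a rest ih =>
    match rest, ih with
    | [], _ => right; rfl
    | b :: t, ih =>
      by_cases h : (a == b && (a == 'a' || a == 'i' || a == 'u')) = true
      · left; simp [pvScanAdj, h]
      · simpa [pvScanAdj, h] using ih

-- B's scan agrees with A's substring test on every character list
theorem pvScanAdj_eq (cs : List Char) : pvScanAdj cs = pvDoubleVowel cs := by
  unfold pvDoubleVowel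
  by_cases h : (PySem.Chars.isIn ['a', 'a'] cs || PySem.Chars.isIn ['i', 'i'] cs
      || PySem.Chars.isIn ['u', 'u'] cs) = true
  · rw [if_pos h, (pvScanAdj_some_iff cs).2]
    simpa [PySem.Chars.isIn_iff_infix, or_assoc] using h
  · rw [if_neg h]
    rcases pvScanAdj_none_or cs with hs | hs
    · exfalso; apply h
      simpa [PySem.Chars.isIn_iff_infix, or_assoc] using (pvScanAdj_some_iff cs).1 hs
    · exact hs

-- functional model of PySem.Chars.splitOn.go for the one-character separator '-'
def pvSplitHelp : List Char → List Char → List (List Char)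
  | cur, [] => [cur.reverse]
  | cur, c :: rest =>
      if c = '-' then cur.reverse :: pvSplitHelp [] rest else pvSplitHelp (c :: cur) rest

theorem pvSplitOn_go_eq (l : List Char) :
    ∀ (fuel : Nat) (cur : List Char) (acc : List (List Char)), l.length < fuel →
      PySem.Chars.splitOn.go ['-'] fuel l cur acc = acc.reverse ++ pvSplitHelp cur l := by
  induction l with
  | nil =>
    intro fuel cur acc h
    match fuel with
    | f + 1 => simp [PySem.Chars.splitOn.go, pvSplitHelp]
  | cons c rest ih =>
    intro fuel cur acc h
    match fuel with
    | f + 1 =>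
      have hlen : rest.length < f := by simpa using h
      by_cases hc : c = '-'
      · subst hc
        rw [show PySem.Chars.splitOn.go ['-'] (f+1) ('-' :: rest) cur acc =
            PySem.Chars.splitOn.go ['-'] f rest [] (cur.reverse :: acc) by
          simp [PySem.Chars.splitOn.go, List.isPrefixOf]]
        rw [ih f [] _ hlen]
        simp [pvSplitHelp]
      · rw [show PySem.Chars.splitOn.go ['-'] (f+1) (c :: rest) cur acc =
            PySem.Chars.splitOn.go ['-'] f rest (c :: cur) acc by
          simp [PySem.Chars.splitOn.go, List.isPrefixOf]
          exact fun h => absurd h.symm hc]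
        rw [ih f _ _ hlen]
        simp [pvSplitHelp, hc]

theorem pvSplitOn_eq (cs : List Char) :
    PySem.Chars.splitOn cs ['-'] = pvSplitHelp [] cs := by
  have := pvSplitOn_go_eq cs (cs.length + 1) [] [] (by omega)
  simpa [PySem.Chars.splitOn] using this

theorem pvSplitHelp_no_hyphen (l : List Char) :
    ∀ cur, '-' ∉ l → pvSplitHelp cur l = [cur.reverse ++ l] := by
  induction l with
  | nil => intro cur _; simp [pvSplitHelp]
  | cons c rest ih =>
    intro cur h
    have hc : ¬ c = '-' := by intro hc; exact h (by simp [hc])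
    rw [pvSplitHelp, if_neg hc, ih _ (fun hm => h (List.mem_cons_of_mem _ hm))]
    simp

theorem pvSplitHelp_append (l1 l2 : List Char) :
    ∀ cur, '-' ∉ l1 →
      pvSplitHelp cur (l1 ++ '-' :: l2) = (cur.reverse ++ l1) :: pvSplitHelp [] l2 := by
  induction l1 with
  | nil => intro cur _; simp [pvSplitHelp]
  | cons c rest ih =>
    intro cur h
    have hc : ¬ c = '-' := by intro hc; exact h (by simp [hc])
    rw [List.cons_append, pvSplitHelp, if_neg hc,
      ih _ (fun hm => h (List.mem_cons_of_mem _ hm))]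
    simp

theorem pvSplitHelp_ne_nil (l : List Char) : ∀ cur, pvSplitHelp cur l ≠ [] := by
  induction l with
  | nil => intro cur; simp [pvSplitHelp]
  | cons c rest ih =>
    intro cur
    by_cases hc : c = '-'
    · rw [pvSplitHelp, if_pos hc]; simp
    · rw [pvSplitHelp, if_neg hc]; exact ih _

theorem pvSplitHelp_two_le (l : List Char) :
    ∀ cur, '-' ∈ l → 2 ≤ (pvSplitHelp cur l).length := by
  induction l with
  | nil => intro _ h; simp at h
  | cons c rest ih =>
    intro cur h
    by_cases hc : c = '-'
    · rw [pvSplitHelp, if_pos hc]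
      have h1 : pvSplitHelp ([] : List Char) rest ≠ [] := pvSplitHelp_ne_nil rest []
      have : 1 ≤ (pvSplitHelp ([] : List Char) rest).length := by
        cases hrest : pvSplitHelp ([] : List Char) rest with
        | nil => exact absurd hrest h1
        | cons _ _ => simp
      simp; omega
    · rw [pvSplitHelp, if_neg hc]
      refine ih _ ?_
      rcases List.mem_cons.1 h with h' | h'
      · exact absurd h'.symm hc
      · exact h'

-- decomposition of wl at the first hyphen (find points at the first occurrence)
theorem pvFind_decomp (wl : List Char) (h : 0 ≤ PySem.Chars.find wl ['-']) :
    (PySem.Chars.find wl ['-']).toNat < wl.length ∧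
    '-' ∉ wl.take (PySem.Chars.find wl ['-']).toNat ∧
    wl = wl.take (PySem.Chars.find wl ['-']).toNat ++
      '-' :: wl.drop ((PySem.Chars.find wl ['-']).toNat + 1) := by
  set k := (PySem.Chars.find wl ['-']).toNat with hk
  obtain ⟨hpre, hmin⟩ := PySem.Chars.find_spec (s := wl) (sub := ['-']) h
  obtain ⟨u, hu⟩ := hpre
  have hdrop : wl.drop k = '-' :: u := by simpa using hu.symm
  have hklt : k < wl.length := by
    by_contra hge
    have : wl.drop k = [] := List.drop_eq_nil_of_le (by omega)
    rw [this] at hdrop; exact (List.cons_ne_nil _ _ hdrop.symm)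
  have hdrop1 : wl.drop (k + 1) = u := by
    have : wl.drop (k + 1) = (wl.drop k).drop 1 := by
      rw [List.drop_drop]
    rw [this, hdrop]; rfl
  refine ⟨hklt, ?_, ?_⟩
  · intro hmem
    obtain ⟨j, hj, hjget⟩ := List.mem_iff_getElem.1 hmem
    have hjk : j < k := by simp at hj; omega
    have hjlt : j < wl.length := by omega
    apply hmin j hjk
    have hgj : wl[j] = '-' := by
      have := hjget
      rwa [List.getElem_take] at this
    refine ⟨wl.drop (j + 1), ?_⟩
    rw [List.drop_eq_getElem_cons hjlt, hgj]; rfl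
  · conv_lhs => rw [← List.take_append_drop k wl]
    rw [hdrop, hdrop1]

theorem check_if_filipino_main (word : String) :
    check_if_filipino word = check_if_filipino_alt word := by
  unfold check_if_filipino check_if_filipino_alt
  by_cases he : word.toList.isEmpty
  · simp [he]
  · rw [if_neg he, if_neg he]
    simp only []
    set wl := PySem.Chars.lower word.toList with hwl
    by_cases hin : PySem.Chars.isIn ['-'] wl = true
    · -- a hyphen is present: find is nonnegative, decompose at the first hyphen
      have hinf : ['-'] <:+: wl := (PySem.Chars.isIn_iff_infix _ _).1 hin
      have h0 : 0 ≤ PySem.Chars.find wl ['-'] := (PySem.Chars.find_nonneg_iff _ _).2 hinf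
      set f := PySem.Chars.find wl ['-'] with hf
      set k := f.toNat with hk
      obtain ⟨hklt, hno1, hdecomp⟩ := pvFind_decomp wl h0
      set l1 := wl.take k with hl1
      set l2 := wl.drop (k + 1) with hl2
      have hparts : PySem.Chars.splitOn wl ['-'] = l1 :: pvSplitHelp [] l2 := by
        rw [pvSplitOn_eq]
        conv_lhs => rw [hdecomp]
        rw [pvSplitHelp_append _ _ _ hno1]
        simp
      have hsl1 : PySem.Chars.slice wl none (some f) = l1 := by
        rw [PySem.Chars.slice_eq_listSlice, PySem.List.slice_to wl h0]
      have hsl2 : PySem.Chars.slice wl (some (f + 1)) none = l2 := by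
        rw [PySem.Chars.slice_eq_listSlice, PySem.List.slice_from wl (by omega : (0:Int) ≤ f + 1)]
        have : (f + 1).toNat = k + 1 := by omega
        rw [this]
      have hl1len : l1.length = k := by
        rw [hl1, List.length_take]; omega
      rw [hin, if_pos rfl, hparts, hsl1, hsl2]
      by_cases hmem : '-' ∈ l2
      · -- more than one hyphen: A sees ≥ 3 parts, B sees unequal halves
        have hlen3 : 2 ≤ (pvSplitHelp ([] : List Char) l2).length := pvSplitHelp_two_le l2 [] hmem
        have hAcond : ((l1 :: pvSplitHelp [] l2).length == 2) = false := by
          simp; omega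
        have hne : l1 ≠ l2 := fun he' => hno1 (by rw [he']; exact hmem)
        have hBcond : (l1 == l2) = false := by
          exact beq_eq_false_iff_ne.2 hne
        rw [hAcond, hBcond]
        simp [pvScanAdj_eq]
      · -- exactly one hyphen: both test 'prefix = suffix and prefix length ≥ 2'
        rw [pvSplitHelp_no_hyphen l2 [] hmem]
        have hiff : (2 ≤ l1.length) ↔ (2 ≤ f) := by rw [hl1len, hk]; omega
        by_cases heq : l1 = l2
        · by_cases h2 : (2:Int) ≤ f
          · have h2l : 2 ≤ l2.length := by rw [← heq]; exact hiff.2 h2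
            simp [heq, h2, h2l]
          · have hn2 : ¬ 2 ≤ l2.length := by rw [← heq]; exact fun hh => h2 (hiff.1 hh)
            simp [heq, h2, hn2, pvScanAdj_eq]
        · have hb : (l1 == l2) = false := beq_eq_false_iff_ne.2 heq
          simp [hb, pvScanAdj_eq]
    · -- no hyphen: A skips the branch, B's find is -1 so its guard is false
      have hnot : ¬ (['-'] <:+: wl) := fun hinf => hin ((PySem.Chars.isIn_iff_infix _ _).2 hinf)
      have hfind : PySem.Chars.find wl ['-'] = -1 := (PySem.Chars.find_eq_neg_one_iff _ _).2 hnot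
      rw [if_neg hin, hfind]
      simp [pvScanAdj_eq]

-- ===== VERDICT (by name: the statement is the Claim_ definition above) =====
theorem check_if_filipino_spec : Claim_equal_check_if_filipino := by
  intro word _
  unfold Spec_check_if_filipino
  exact check_if_filipino_main word
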